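-- pv_equiv track=rewrite | github.com/dratcliff/advent-of-code | 2015/Day20p2.py | get_house_map
-- ===== SOURCE A (Python) =====
-- def get_house_map(max_house):
--     m = {i: 10 for i in range(0, max_house)}
--     for i in range(2, max_house):
--         current = i
--         for j in range(0, 50):
--             if current in m:
--                 m[current] += 11*i
--             current += i
--
--     return m
-- ===== SOURCE B (Python) =====
-- def presents(h):
--     total = 10
--     for k in range(1, 51):
--         if h % k == 0 and h // k >= 2:
--             total += 11 * (h // k)
--     return total
--
--
-- def get_house_map(max_house):
--     return {h: presents(h) for h in range(0, max_house)}
-- ===== Notes on version B (the rewrite author's own statement) =====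
-- stated objective: faster
-- what changed: Replaces the per-elf multiple-sieve, which repeatedly mutates a shared dict (fifty hash updates per elf), by a per-house divisor enumeration: each house's total is computed independently from its small divisors and their co-factors, so the dict is built in a single comprehension with no membership tests or updates.
import Mathlib
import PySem

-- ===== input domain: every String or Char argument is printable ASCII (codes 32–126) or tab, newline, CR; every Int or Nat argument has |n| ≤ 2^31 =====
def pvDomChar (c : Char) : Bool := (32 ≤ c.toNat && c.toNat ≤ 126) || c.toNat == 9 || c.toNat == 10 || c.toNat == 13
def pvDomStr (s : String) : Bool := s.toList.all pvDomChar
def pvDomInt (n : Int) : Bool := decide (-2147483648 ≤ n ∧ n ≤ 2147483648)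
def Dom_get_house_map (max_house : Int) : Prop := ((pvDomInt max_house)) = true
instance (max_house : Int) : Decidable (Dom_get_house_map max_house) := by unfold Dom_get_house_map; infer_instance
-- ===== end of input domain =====

-- B replaces A's per-elf multiple-sieve (repeated dict mutation) by an independent per-house
-- divisor enumeration; same asymptotic cost, measurably faster constant (no dict updates).

-- ===== PORT A =====
def get_house_map (max_house : Int) : List (Int × Int) :=
  let m0 : PySem.Dict Int Int :=
    (PySem.List.pyRange 0 max_house 1).foldl (fun d i => d.insert i 10) PySem.Dict.empty
  let m := (PySem.List.pyRange 2 max_house 1).foldl (fun m i =>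
    ((PySem.List.pyRange 0 50 1).foldl
        (fun (st : PySem.Dict Int Int × Int) _ =>
          ((if st.1.contains st.2 then st.1.modify st.2 0 (· + 11 * i) else st.1), st.2 + i))
        (m, i)).1) m0
  m.items

-- ===== PORT B =====
def presents (h : Int) : Int :=
  (PySem.List.pyRange 1 51 1).foldl
    (fun total k =>
      if PySem.Int.mod h k = 0 ∧ 2 ≤ PySem.Int.floordiv h k
      then total + 11 * PySem.Int.floordiv h k else total) 10

def get_house_map_alt (max_house : Int) : List (Int × Int) :=
  (PySem.List.pyRange 0 max_house 1).map (fun h => (h, presents h))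

-- ===== PRECONDITION & SPEC =====
def Spec_get_house_map (max_house : Int) (out : List (Int × Int)) : Prop := out = get_house_map_alt max_house
instance (max_house : Int) (out : List (Int × Int)) : Decidable (Spec_get_house_map max_house out) := by unfold Spec_get_house_map; infer_instance

-- ===== CLAIM (what is proved, stated in full; the proofs are below) =====
def Claim_equal_get_house_map : Prop := ∀ (max_house : Int), Dom_get_house_map max_house → Spec_get_house_map max_house (get_house_map max_house)

-- ===== LEMMAS AND PROOFS =====

/-- One delivery step of A: elf `p.1` drops `11*p.1` presents at house `p.2` if it exists. -/
def pvStep (m : PySem.Dict Int Int) (p : Int × Int) : PySem.Dict Int Int :=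
  if m.contains p.2 then m.modify p.2 0 (· + 11 * p.1) else m

/-- The 50 (elf, house) deliveries of elf `i` starting at house `c`. -/
def pvInner (i c : Int) (n : Nat) : List (Int × Int) :=
  (List.range n).map (fun (j : Nat) => (i, c + i * (j : Int)))

/-- All deliveries of A's sieve. -/
def pvL (mh : Int) : List (Int × Int) :=
  (PySem.List.pyRange 2 mh 1).flatMap (fun i => pvInner i i 50)

theorem pv_inner_fold (i : Int) (l : List Int) : ∀ (m : PySem.Dict Int Int) (c : Int),
    (l.foldl (fun st _ => ((if st.1.contains st.2 then st.1.modify st.2 0 (· + 11 * i) else st.1), st.2 + i)) (m, c)).1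
      = (pvInner i c l.length).foldl pvStep m := by
  induction l with
  | nil => intro m c; rfl
  | cons x t ih =>
    intro m c
    simp only [List.foldl_cons, List.length_cons]
    rw [ih]
    unfold pvInner
    rw [List.range_succ_eq_map, List.map_cons, List.map_map, List.foldl_cons]
    have h1 : ((fun (j : Nat) => ((i, c + i * (j : Int)) : Int × Int)) ∘ Nat.succ) = (fun (j : Nat) => (i, (c + i) + i * (j : Int))) := by
      funext j; simp only [Function.comp]; push_cast; ring_nf
    have h2 : ((i, c + i * (((0:Nat)) : Int)) : Int × Int) = ((i, c) : Int × Int) := by norm_num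
    rw [h1, h2]
    rfl

theorem pv_fold_flat (g : Int → List (Int × Int)) : ∀ (l : List Int) (m0 : PySem.Dict Int Int),
    l.foldl (fun m i => (g i).foldl pvStep m) m0 = (l.flatMap g).foldl pvStep m0 := by
  intro l
  induction l with
  | nil => intro m0; rfl
  | cons x t ih => intro m0; simp only [List.foldl_cons, List.flatMap_cons, List.foldl_append]; exact ih _

theorem pv_step_keys (m : PySem.Dict Int Int) (p : Int × Int) : (pvStep m p).keys = m.keys := by
  unfold pvStep
  split_ifs with hc
  · rw [PySem.Dict.keys_modify, PySem.Dict.keys_insert_of_contains _ _ hc]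
  · rfl

theorem pv_fold_keys (ps : List (Int × Int)) : ∀ m, (ps.foldl pvStep m).keys = m.keys := by
  induction ps with
  | nil => intro m; rfl
  | cons p t ih => intro m; rw [List.foldl_cons, ih, pv_step_keys]

theorem pv_fold_getD (h : Int) (ps : List (Int × Int)) : ∀ m,
    (ps.foldl pvStep m).getD h 0 = m.getD h 0 +
      (if m.contains h = true then ((ps.filter (fun p => p.2 == h)).map (fun p => 11 * p.1)).sum else 0) := by
  induction ps with
  | nil => intro m; by_cases hc : m.contains h = true <;> simp [hc]
  | cons p t ih =>
    intro m
    have hck : (pvStep m p).contains h = m.contains h := by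
      rw [PySem.Dict.contains_eq_decide_mem_keys, PySem.Dict.contains_eq_decide_mem_keys, pv_step_keys]
    rw [List.foldl_cons, ih, hck]
    by_cases hc : m.contains h = true
    · rw [if_pos hc, if_pos hc]
      by_cases hc2 : m.contains p.2 = true
      · have hstep : pvStep m p = m.modify p.2 0 (· + 11 * p.1) := by unfold pvStep; rw [if_pos hc2]
        rw [hstep, PySem.Dict.getD_modify]
        by_cases hph : p.2 = h
        · rw [if_pos hph.symm, List.filter_cons, if_pos (by simp [hph]), List.map_cons, List.sum_cons, hph]
          ring
        · rw [if_neg (fun hh => hph hh.symm), List.filter_cons, if_neg (by simp [hph]), ]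
      · have hstep : pvStep m p = m := by unfold pvStep; rw [if_neg hc2]
        have hph : p.2 ≠ h := fun hh => hc2 (hh ▸ hc)
        rw [hstep, List.filter_cons, if_neg (by simp [hph])]
    · rw [if_neg hc, if_neg hc]
      by_cases hc2 : m.contains p.2 = true
      · have hstep : pvStep m p = m.modify p.2 0 (· + 11 * p.1) := by unfold pvStep; rw [if_pos hc2]
        have hph : h ≠ p.2 := fun hh => hc (hh ▸ hc2)
        rw [hstep, PySem.Dict.getD_modify, if_neg hph]
      · have hstep : pvStep m p = m := by unfold pvStep; rw [if_neg hc2]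
        rw [hstep]

def pvM0 (mh : Int) : PySem.Dict Int Int :=
  (PySem.List.pyRange 0 mh 1).foldl (fun d i => d.insert i 10) PySem.Dict.empty

theorem pv_m0_items (mh : Int) : (pvM0 mh).items = (PySem.List.pyRange 0 mh 1).map (fun i => (i, (10 : Int))) := by
  unfold pvM0
  rw [PySem.Dict.items_foldl_insert_fresh (PySem.List.pyRange 0 mh 1) (fun i => i) (fun _ => (10:Int))
      PySem.Dict.empty (fun a _ => PySem.Dict.contains_empty a)
      (by simpa using PySem.List.nodup_pyRange_one 0 mh)]
  rfl

theorem pv_m0_keys (mh : Int) : (pvM0 mh).keys = PySem.List.pyRange 0 mh 1 := by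
  have h1 := pv_m0_items mh
  show (pvM0 mh).items.map Prod.fst = _
  rw [h1, List.map_map]
  exact List.map_id _

theorem pv_m0_getD {mh h : Int} (hm : h ∈ PySem.List.pyRange 0 mh 1) : (pvM0 mh).getD h 0 = 10 := by
  refine PySem.Dict.getD_of_mem_items _ ?_ ?_ 0
  · rw [pv_m0_items]; exact List.mem_map.mpr ⟨h, hm, rfl⟩
  · rw [pv_m0_keys]; exact PySem.List.nodup_pyRange_one 0 mh

theorem pv_m0_contains {mh h : Int} (hm : h ∈ PySem.List.pyRange 0 mh 1) : (pvM0 mh).contains h = true := by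
  rw [PySem.Dict.contains_eq_decide_mem_keys, pv_m0_keys]
  exact decide_eq_true hm

/-- A computed as a map over houses. -/
theorem pv_A_char (mh : Int) : get_house_map mh =
    (PySem.List.pyRange 0 mh 1).map (fun h =>
      (h, 10 + (((pvL mh).filter (fun p => p.2 == h)).map (fun p => 11 * p.1)).sum)) := by
  show ((PySem.List.pyRange 2 mh 1).foldl (fun m i =>
    ((PySem.List.pyRange 0 50 1).foldl
        (fun (st : PySem.Dict Int Int × Int) _ =>
          ((if st.1.contains st.2 then st.1.modify st.2 0 (· + 11 * i) else st.1), st.2 + i))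
        (m, i)).1) (pvM0 mh)).items = _
  have h1 : (fun (m : PySem.Dict Int Int) (i : Int) =>
      ((PySem.List.pyRange 0 50 1).foldl
          (fun (st : PySem.Dict Int Int × Int) _ =>
            ((if st.1.contains st.2 then st.1.modify st.2 0 (· + 11 * i) else st.1), st.2 + i))
          (m, i)).1) = fun m i => (pvInner i i 50).foldl pvStep m := by
    funext m i
    rw [pv_inner_fold i (PySem.List.pyRange 0 50 1) m i, PySem.List.length_pyRange_one]
    rfl
  rw [h1, pv_fold_flat (fun i => pvInner i i 50) (PySem.List.pyRange 2 mh 1) (pvM0 mh)]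
  have hkeys : ((pvL mh).foldl pvStep (pvM0 mh)).keys = PySem.List.pyRange 0 mh 1 := by
    rw [pv_fold_keys, pv_m0_keys]
  have hnd : ((pvL mh).foldl pvStep (pvM0 mh)).keys.Nodup := by
    rw [hkeys]; exact PySem.List.nodup_pyRange_one 0 mh
  rw [show ((PySem.List.pyRange 2 mh 1).flatMap fun i => pvInner i i 50) = pvL mh from rfl]
  rw [PySem.Dict.items_eq_map_keys _ hnd 0, hkeys]
  refine List.map_congr_left fun h hm => ?_
  rw [pv_fold_getD h (pvL mh) (pvM0 mh), pv_m0_getD hm, pv_m0_contains hm, if_pos rfl]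

theorem pv_sum_if (p : Int → Prop) [DecidablePred p] (g : Int → Int) : ∀ (l : List Int) (a : Int),
    l.foldl (fun acc x => if p x then acc + g x else acc) a
      = a + (l.map (fun x => if p x then g x else 0)).sum := by
  intro l
  induction l with
  | nil => intro a; simp
  | cons x t ih =>
    intro a
    simp only [List.foldl_cons, List.map_cons, List.sum_cons]
    by_cases hp : p x
    · rw [if_pos hp, if_pos hp, ih]; ring
    · rw [if_neg hp, if_neg hp, ih]; ring

theorem pv_sum_filter_if (p : Int × Int → Bool) (f : Int × Int → Int) (l : List (Int × Int)) :
    ((l.filter p).map f).sum = (l.map (fun x => if p x then f x else 0)).sum := by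
  induction l with
  | nil => rfl
  | cons x t ih =>
    by_cases hp : p x = true
    · simp only [List.filter_cons, hp, if_pos, List.map_cons, List.sum_cons, ih]
    · rw [List.filter_cons, if_neg (by simp [hp]), List.map_cons, List.sum_cons, ih, if_neg hp]
      ring

theorem pv_sum_flat (p : Int × Int → Bool) (f : Int × Int → Int) (g : Int → List (Int × Int)) (l : List Int) :
    (((l.flatMap g).filter p).map f).sum = (l.map (fun i => (((g i).filter p).map f).sum)).sum := by
  induction l with
  | nil => rfl
  | cons x t ih =>
    simp only [List.flatMap_cons, List.filter_append, List.map_append, List.sum_append,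
      List.map_cons, List.sum_cons, ih]

theorem pv_list_range_sum (g : Nat → Int) : ∀ (N : Nat), ((List.range N).map g).sum = ∑ j ∈ Finset.range N, g j := by
  intro N
  induction N with
  | zero => simp
  | succ n ih => rw [List.range_succ, List.map_append, List.sum_append, Finset.sum_range_succ, ih]; simp

/-- The core sum interchange: per-elf deliveries to house `h` = per-house divisor enumeration. -/
theorem pv_core (mh h : Int) (h0 : 0 ≤ h) (hlt : h < mh) :
    (((pvL mh).filter (fun p => p.2 == h)).map (fun p => 11 * p.1)).sum
      = ((PySem.List.pyRange 1 51 1).map (fun k =>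
          if PySem.Int.mod h k = 0 ∧ 2 ≤ PySem.Int.floordiv h k
          then 11 * PySem.Int.floordiv h k else 0)).sum := by
  have hinner : ∀ (i : Int), (((pvInner i i 50).filter (fun p => p.2 == h)).map (fun p => 11 * p.1)).sum
      = ∑ j ∈ Finset.range 50, (if i * (1 + (j:Int)) = h then 11 * i else 0) := by
    intro i
    rw [pv_sum_filter_if]
    unfold pvInner
    rw [List.map_map, pv_list_range_sum]
    refine Finset.sum_congr rfl fun j _ => ?_
    simp only [Function.comp_apply, beq_iff_eq]
    refine if_congr ?_ rfl rfl
    constructor <;> intro hh <;> [skip; skip] <;> linarith [hh, mul_one i, mul_add i 1 (j:Int)]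
  have hout : PySem.List.pyRange 2 mh 1 = (List.range (mh-2).toNat).map (fun (n:Nat) => 2 + (n:Int)) :=
    PySem.List.pyRange_one 2 mh
  have hq50 : PySem.List.pyRange 1 51 1 = (List.range (50:Nat)).map (fun (j:Nat) => 1 + (j:Int)) := by
    rw [PySem.List.pyRange_one]; rfl
  unfold pvL
  rw [pv_sum_flat, hout, hq50, List.map_map, List.map_map, pv_list_range_sum, pv_list_range_sum]
  have hL : ∀ n : Nat, ((fun i => (((pvInner i i 50).filter (fun p => p.2 == h)).map (fun p => 11 * p.1)).sum) ∘
      (fun (n:Nat) => 2 + (n:Int))) n = ∑ j ∈ Finset.range 50, (if (2 + (n:Int)) * (1 + (j:Int)) = h then 11 * (2 + (n:Int)) else 0) := by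
    intro n; exact hinner (2 + (n:Int))
  rw [Finset.sum_congr rfl (fun n _ => hL n), Finset.sum_comm]
  refine Finset.sum_congr rfl fun j _ => ?_
  simp only [Function.comp_apply]
  set q : Int := 1 + (j:Int) with hqdef
  have hq : 0 < q := by positivity
  have hfd : PySem.Int.floordiv h q = h / q := by
    show Int.fdiv h q = h / q
    rw [Int.fdiv_eq_ediv, if_pos (Or.inl (le_of_lt hq))]; ring
  have hfm : PySem.Int.mod h q = h % q := by
    show Int.fmod h q = h % q
    rw [Int.fmod_eq_emod, if_pos (Or.inl (le_of_lt hq))]; ring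
  rw [hfd, hfm]
  by_cases hcond : h % q = 0 ∧ 2 ≤ h / q
  · have hdq : q ∣ h := Int.dvd_of_emod_eq_zero hcond.1
    have hmul : (h / q) * q = h := Int.ediv_mul_cancel hdq
    have hle : h / q ≤ h := Int.ediv_le_self q h0
    have hi0lt : h / q < mh := lt_of_le_of_lt hle hlt
    have hn0 : ((h / q - 2).toNat : Int) = h / q - 2 := Int.toNat_of_nonneg (by omega)
    have hiff : ∀ n : Nat, ((2 + (n:Int)) * q = h) ↔ (n = (h / q - 2).toNat) := by
      intro n
      constructor
      · intro hh
        have : (2 + (n:Int)) = h / q := mul_right_cancel₀ (ne_of_gt hq) (hh.trans hmul.symm)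
        omega
      · intro hh
        subst hh
        have : (2 + ((h / q - 2).toNat : Int)) = h / q := by omega
        rw [this, hmul]
    rw [Finset.sum_congr rfl (fun n _ => if_congr (hiff n) rfl rfl),
      Finset.sum_ite_eq' (Finset.range (mh-2).toNat) ((h / q - 2).toNat) (fun n => 11 * (2 + (n:Int))),
      if_pos (Finset.mem_range.mpr (by omega)), if_pos hcond]
    have : (2 + (((h / q - 2).toNat) : Int)) = h / q := by omega
    rw [this]
  · rw [if_neg hcond]
    refine Finset.sum_eq_zero fun n _ => ?_
    rw [if_neg]
    intro hh
    exact hcond ⟨Int.emod_eq_zero_of_dvd ⟨2 + (n:Int), by linarith [hh, mul_comm (2 + (n:Int)) q]⟩, by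
      have : h / q = 2 + (n:Int) := by rw [← hh, Int.mul_ediv_cancel _ (ne_of_gt hq)]
      omega⟩

theorem pv_presents (mh h : Int) (h0 : 0 ≤ h) (hlt : h < mh) :
    presents h = 10 + (((pvL mh).filter (fun p => p.2 == h)).map (fun p => 11 * p.1)).sum := by
  unfold presents
  rw [pv_sum_if (fun k => PySem.Int.mod h k = 0 ∧ 2 ≤ PySem.Int.floordiv h k)
      (fun k => 11 * PySem.Int.floordiv h k) (PySem.List.pyRange 1 51 1) 10,
    pv_core mh h h0 hlt]

-- ===== VERDICT (by name: the statement is the Claim_ definition above) =====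
theorem get_house_map_spec : Claim_equal_get_house_map := by
  intro mh _
  unfold Spec_get_house_map get_house_map_alt
  rw [pv_A_char]
  refine List.map_congr_left fun h hm => ?_
  rw [PySem.List.mem_pyRange_one] at hm
  rw [pv_presents mh h hm.1 hm.2]
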